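-- pv_equiv track=rewrite | github.com/Ishankoradia/Data-Structures-and-Algorithms | Arrays/CarryForward/closest_minMax.py | solve
-- ===== SOURCE A (Python) =====
-- def solve(A):
--     max_a = A[0]
--     for i in range(len(A)):
--         if A[i] > max_a:
--             max_a = A[i]
--
--     min_a = A[0]
--     for i in range(len(A)):
--         if A[i] < min_a:
--             min_a = A[i]
--
--     max_idx = -1
--     min_idx = -1
--     ans = len(A)
--     for i in range(len(A)):
--         if A[i] == max_a:
--             if min_idx >= 0 and i - min_idx + 1 < ans:
--                 ans = i - min_idx + 1
--             max_idx = i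
--
--         if A[i] == min_a:
--             if max_idx >= 0 and i - max_idx + 1 < ans:
--                 ans = i - max_idx + 1
--             min_idx = i
--
--     return ans
-- ===== SOURCE B (Python) =====
-- def solve(A):
--     mn = mx = A[0]
--     for x in A:
--         if x < mn:
--             mn = x
--         if x > mx:
--             mx = x
--     minpos = [i for i, x in enumerate(A) if x == mn]
--     maxpos = [i for i, x in enumerate(A) if x == mx]
--     best = len(A) - 1
--     p = q = 0
--     while p < len(minpos) and q < len(maxpos):
--         d = abs(minpos[p] - maxpos[q])
--         if d < best:
--             best = d
--         if minpos[p] < maxpos[q]: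
--             p += 1
--         else:
--             q += 1
--     return best + 1
-- ===== Notes on version B (the rewrite author's own statement) =====
-- stated objective: alternative
-- what changed: Replaces the carry-forward scan that updates last-seen min/max indices at every element by first collecting the sorted index lists of min and max occurrences and then running a two-pointer merge over those two lists.
import Mathlib
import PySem

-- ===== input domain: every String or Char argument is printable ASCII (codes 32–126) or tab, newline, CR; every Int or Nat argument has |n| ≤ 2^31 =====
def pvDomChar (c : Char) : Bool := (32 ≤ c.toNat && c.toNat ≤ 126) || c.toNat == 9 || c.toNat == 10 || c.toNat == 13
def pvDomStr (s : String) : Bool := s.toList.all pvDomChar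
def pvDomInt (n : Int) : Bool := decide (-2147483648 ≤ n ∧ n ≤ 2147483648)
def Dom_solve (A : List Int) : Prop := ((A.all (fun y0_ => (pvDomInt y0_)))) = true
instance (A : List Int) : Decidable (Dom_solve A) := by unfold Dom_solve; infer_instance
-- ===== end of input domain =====

-- B: same answer via min/max occurrence-index lists and a two-pointer merge (alternative decomposition, same cost).

-- ===== PORT A =====
def solve (A : List Int) : Int :=
  match PySem.List.pyGet? A 0 with
  | none => 0  -- IndexError on A[0]; excluded by Pre_solve
  | some a0 =>
    let max_a := (PySem.List.pyRange 0 (A.length : Int) 1).foldl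
      (fun m i => let x := PySem.List.pyGetD A i 0; if x > m then x else m) a0
    let min_a := (PySem.List.pyRange 0 (A.length : Int) 1).foldl
      (fun m i => let x := PySem.List.pyGetD A i 0; if x < m then x else m) a0
    let st := (PySem.List.pyRange 0 (A.length : Int) 1).foldl
      (fun st i =>
        let x := PySem.List.pyGetD A i 0
        -- state (max_idx, min_idx, ans); first branch (A[i] == max_a), then (A[i] == min_a)
        let st1 := if x == max_a then
            (i, st.2.1, if 0 ≤ st.2.1 ∧ i - st.2.1 + 1 < st.2.2 then i - st.2.1 + 1 else st.2.2)
          else st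
        if x == min_a then
            (st1.1, i, if 0 ≤ st1.1 ∧ i - st1.1 + 1 < st1.2.2 then i - st1.1 + 1 else st1.2.2)
          else st1)
      (-1, -1, (A.length : Int))
    st.2.2

-- ===== PORT B =====
-- the while loop: advance whichever pointer (here: list) holds the smaller index, tracking the best |p - q|
def solveAltLoop : List Int → List Int → Int → Int
  | p :: ps, q :: qs, best =>
      let d := |p - q|
      let best' := if d < best then d else best
      if p < q then solveAltLoop ps (q :: qs) best'
      else solveAltLoop (p :: ps) qs best'
  | _, _, best => best
  termination_by P Q _ => P.length + Q.length

def solve_alt (A : List Int) : Int :=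
  match A with
  | [] => 0  -- raises on A[0]; excluded by Pre_solve
  | a :: _ =>
    let mm := A.foldl (fun (m : Int × Int) x =>
      (if x < m.1 then x else m.1, if x > m.2 then x else m.2)) (a, a)
    let minpos := ((PySem.List.enumerate A 0).filter (fun ix => ix.2 == mm.1)).map (·.1)
    let maxpos := ((PySem.List.enumerate A 0).filter (fun ix => ix.2 == mm.2)).map (·.1)
    solveAltLoop minpos maxpos ((A.length : Int) - 1) + 1

-- ===== PRECONDITION & SPEC =====
-- Pre excludes only the empty list, on which A raises IndexError (A[0]).
def Pre_solve (A : List Int) : Prop := A ≠ []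
instance (A : List Int) : Decidable (Pre_solve A) := by unfold Pre_solve; infer_instance
def pvWitness_solve : List Int := [1, 3, 2]

def Spec_solve (A : List Int) (out : Int) : Prop := out = solve_alt A
instance (A : List Int) (out : Int) : Decidable (Spec_solve A out) := by unfold Spec_solve; infer_instance

-- ===== CLAIM (what is proved, stated in full; the proofs are below) =====
def Claim_equal_solve : Prop := ∀ (A : List Int), Dom_solve A → Pre_solve A → Spec_solve A (solve A)

-- ===== LEMMAS AND PROOFS =====

-- state components: (max_idx, min_idx, ans); step of A's third loop, as a function of one (index, value) pair
def stepA (mx mn : Int) (st : Int × Int × Int) (ix : Int × Int) : Int × Int × Int :=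
  let st1 := if ix.2 == mx then
      (ix.1, st.2.1, if 0 ≤ st.2.1 ∧ ix.1 - st.2.1 + 1 < st.2.2 then ix.1 - st.2.1 + 1 else st.2.2)
    else st
  if ix.2 == mn then
      (st1.1, ix.1, if 0 ≤ st1.1 ∧ ix.1 - st1.1 + 1 < st1.2.2 then ix.1 - st1.1 + 1 else st1.2.2)
    else st1

lemma foldl_pyRange_enumerate {β : Type} (g : β → Int → Int → β) :
    ∀ (suf pre : List Int) (init : β),
      (PySem.List.pyRange (pre.length : Int) ((pre.length : Int) + (suf.length : Int)) 1).foldl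
        (fun acc i => g acc i (PySem.List.pyGetD (pre ++ suf) i 0)) init
      = (PySem.List.enumerate suf (pre.length : Int)).foldl (fun acc ix => g acc ix.1 ix.2) init := by
  intro suf
  induction suf with
  | nil =>
    intro pre init
    rw [PySem.List.pyRange_one_eq_nil (by simp), PySem.List.enumerate_nil]
    rfl
  | cons y ys ih =>
    intro pre init
    rw [PySem.List.pyRange_one_cons (by push_cast [List.length_cons]; omega),
        PySem.List.enumerate_cons]
    simp only [List.foldl_cons]
    have hget : PySem.List.pyGetD (pre ++ y :: ys) ((pre.length : Int)) 0 = y := by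
      rw [PySem.List.pyGetD_natCast]
      simp [List.getD_eq_getElem?_getD]
    rw [hget]
    have h2 := ih (pre ++ [y]) (g init (pre.length : Int) y)
    have e1 : (((pre ++ [y]).length : Nat) : Int) = (pre.length : Int) + 1 := by simp
    rw [e1, List.append_assoc] at h2
    simp only [List.singleton_append] at h2
    rw [show ((pre.length : Int) + ((y :: ys).length : Int)) = ((pre.length : Int) + 1) + (ys.length : Int) by push_cast [List.length_cons]; ring]
    exact h2

lemma foldl_pyRange_enumerate0 {β : Type} (g : β → Int → Int → β) (A : List Int) (init : β) :
    (PySem.List.pyRange 0 (A.length : Int) 1).foldl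
      (fun acc i => g acc i (PySem.List.pyGetD A i 0)) init
    = (PySem.List.enumerate A 0).foldl (fun acc ix => g acc ix.1 ix.2) init := by
  have h := foldl_pyRange_enumerate g A [] init
  simpa using h

lemma foldl_enumerate_snd {β : Type} (h : β → Int → β) :
    ∀ (A : List Int) (s : Int) (init : β),
      (PySem.List.enumerate A s).foldl (fun acc ix => h acc ix.2) init = A.foldl h init := by
  intro A
  induction A with
  | nil => intro s init; simp [PySem.List.enumerate_nil]
  | cons a A ih => intro s init; simp [PySem.List.enumerate_cons, ih]

lemma enumerate_fst_ge : ∀ (A : List Int) (s : Int), ∀ ix ∈ PySem.List.enumerate A s, s ≤ ix.1 := by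
  intro A
  induction A with
  | nil => intro s ix h; simp [PySem.List.enumerate_nil] at h
  | cons a A ih =>
    intro s ix h
    rw [PySem.List.enumerate_cons] at h
    rcases List.mem_cons.mp h with h | h
    · simp [h]
    · have := ih (s + 1) ix h; omega

lemma enumerate_fst_pairwise : ∀ (A : List Int) (s : Int),
    (PySem.List.enumerate A s).Pairwise (fun a b => a.1 < b.1) := by
  intro A
  induction A with
  | nil => intro s; simp [PySem.List.enumerate_nil]
  | cons a A ih =>
    intro s
    rw [PySem.List.enumerate_cons]
    exact List.Pairwise.cons (fun b hb => by have := enumerate_fst_ge A (s + 1) b hb; simp; omega) (ih (s + 1))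

lemma mem_posList (A : List Int) (c p : Int) :
    p ∈ (((PySem.List.enumerate A 0).filter (fun ix => ix.2 == c)).map (·.1))
      ↔ (p, c) ∈ PySem.List.enumerate A 0 := by
  simp only [List.mem_map, List.mem_filter, beq_iff_eq]
  constructor
  · rintro ⟨⟨p', x'⟩, ⟨hmem, hx⟩, hp⟩
    simp only at hx hp
    subst hx; subst hp; exact hmem
  · intro h; exact ⟨(p, c), ⟨h, rfl⟩, rfl⟩

lemma posList_pairwise (A : List Int) (c : Int) :
    (((PySem.List.enumerate A 0).filter (fun ix => ix.2 == c)).map (·.1)).Pairwise (· ≤ ·) := by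
  have h := (enumerate_fst_pairwise A 0).filter (fun ix => ix.2 == c)
  rw [List.pairwise_map]
  exact h.imp (fun hlt => le_of_lt hlt)

-- A's loop invariant: ans only shrinks, is bounded by every (min-pos, max-pos) gap seen so far
-- (the carried min_idx/max_idx acting as positions when nonnegative), and is ans or an actual gap.
lemma abs_sub_of_lt {a b : Int} (h : a < b) : |a - b| = b - a := by
  rw [abs_of_neg (by omega)]; ring

lemma abs_sub_of_ge {a b : Int} (h : b ≤ a) : |a - b| = a - b := abs_of_nonneg (by omega)

lemma loopA_inv (mx mn : Int) :
    ∀ (L : List (Int × Int)) (M m ans : Int),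
      (∀ ix ∈ L, M < ix.1 ∧ m < ix.1 ∧ 0 ≤ ix.1) →
      L.Pairwise (fun a b => a.1 < b.1) →
      (0 ≤ m → 0 ≤ M → ans ≤ |m - M| + 1) →
      (L.foldl (stepA mx mn) (M, m, ans)).2.2 ≤ ans ∧
      (∀ p q : Int, ((0 ≤ m ∧ p = m) ∨ (p, mn) ∈ L) → ((0 ≤ M ∧ q = M) ∨ (q, mx) ∈ L) →
        (L.foldl (stepA mx mn) (M, m, ans)).2.2 ≤ |p - q| + 1) ∧
      ((L.foldl (stepA mx mn) (M, m, ans)).2.2 = ans ∨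
        ∃ p q : Int, ((0 ≤ m ∧ p = m) ∨ (p, mn) ∈ L) ∧ ((0 ≤ M ∧ q = M) ∨ (q, mx) ∈ L) ∧
          (L.foldl (stepA mx mn) (M, m, ans)).2.2 = |p - q| + 1) := by
  intro L
  induction L with
  | nil =>
    intro M m ans h1 hpw hpre
    refine ⟨le_refl _, ?_, Or.inl rfl⟩
    intro p q hp hq
    rcases hp with ⟨hm0, hpm⟩ | hp
    · rcases hq with ⟨hM0, hqM⟩ | hq
      · rw [hpm, hqM]; exact hpre hm0 hM0
      · simp at hq
    · simp at hp
  | cons hd L ih =>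
    obtain ⟨i, x⟩ := hd
    intro M m ans h1 hpw hpre
    obtain ⟨hMi', hmi', hi0'⟩ := h1 (i, x) (List.mem_cons_self ..)
    have hMi : M < i := hMi'
    have hmi : m < i := hmi'
    have hi0 : (0 : Int) ≤ i := hi0'
    have hlt : ∀ ix ∈ L, i < ix.1 := fun ix hix => (List.pairwise_cons.mp hpw).1 ix hix
    have htl : ∀ ix ∈ L, M < ix.1 ∧ m < ix.1 ∧ 0 ≤ ix.1 :=
      fun ix hix => h1 ix (List.mem_cons_of_mem _ hix)
    have hpw' := hpw.of_cons
    simp only [List.foldl_cons]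
    by_cases hx : x = mx <;> by_cases hn : x = mn
    -- CASE 1 : x = mx and x = mn
    · subst hx; subst hn
      simp only [stepA, beq_self_eq_true, if_true]
      set a2 := (if 0 ≤ i ∧ i - i + 1 < if 0 ≤ m ∧ i - m + 1 < ans then i - m + 1 else ans
          then i - i + 1
          else if 0 ≤ m ∧ i - m + 1 < ans then i - m + 1 else ans) with ha2
      have hA : a2 ≤ ans ∧ a2 ≤ 1 ∧ (0 ≤ m → a2 ≤ i - m + 1) ∧
          (a2 = ans ∨ (0 ≤ m ∧ a2 = i - m + 1) ∨ a2 = 1) := by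
        rw [ha2]; split_ifs <;> omega
      obtain ⟨ih1, ih2, ih3⟩ := ih i i a2
        (fun ix hix => by have h := htl ix hix; have := hlt ix hix; exact ⟨by omega, by omega, h.2.2⟩)
        hpw'
        (fun _ _ => by have := abs_nonneg (i - i); omega)
      refine ⟨by omega, ?_, ?_⟩
      · intro p q hp hq
        rcases hp with ⟨hm0, hpm⟩ | hp
        · rcases hq with ⟨hM0, hqM⟩ | hq
          · rw [hpm, hqM]; have := hpre hm0 hM0; omega
          · rcases List.mem_cons.mp hq with heq | hq
            · have hqi : q = i := congrArg Prod.fst heq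
              have e := abs_sub_of_lt (show p < q by omega)
              omega
            · have hiq := hlt (q, x) hq
              have h2 := ih2 i q (Or.inl ⟨hi0, rfl⟩) (Or.inr hq)
              have e1 := abs_sub_of_lt (show i < q from hiq)
              have e2 := abs_sub_of_lt (show p < q by omega)
              omega
        · rcases List.mem_cons.mp hp with heq | hp
          · have hpi : p = i := congrArg Prod.fst heq
            rcases hq with ⟨hM0, hqM⟩ | hq
            · have := abs_nonneg (p - q); omega
            · rcases List.mem_cons.mp hq with heq2 | hq
              · have := abs_nonneg (p - q); omega
              · have h2 := ih2 i q (Or.inl ⟨hi0, rfl⟩) (Or.inr hq)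
                rw [hpi]; exact h2
          · have hip := hlt (p, x) hp
            rcases hq with ⟨hM0, hqM⟩ | hq
            · have h2 := ih2 p i (Or.inr hp) (Or.inl ⟨hi0, rfl⟩)
              have e1 := abs_sub_of_ge (show i ≤ p by omega)
              have e2 := abs_sub_of_ge (show q ≤ p by omega)
              omega
            · rcases List.mem_cons.mp hq with heq2 | hq
              · have hqi : q = i := congrArg Prod.fst heq2
                have h2 := ih2 p i (Or.inr hp) (Or.inl ⟨hi0, rfl⟩)
                have e1 := abs_sub_of_ge (show i ≤ p by omega)
                have e2 := abs_sub_of_ge (show q ≤ p by omega)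
                omega
              · exact ih2 p q (Or.inr hp) (Or.inr hq)
      · rcases ih3 with hr | ⟨p, q, hp, hq, hr⟩
        · rcases hA.2.2.2 with he | ⟨hm0, he⟩ | he
          · exact Or.inl (hr.trans he)
          · refine Or.inr ⟨m, i, Or.inl ⟨hm0, rfl⟩, Or.inr (List.mem_cons_self ..), ?_⟩
            have := abs_sub_of_lt hmi; omega
          · refine Or.inr ⟨i, i, Or.inr (List.mem_cons_self ..), Or.inr (List.mem_cons_self ..), ?_⟩
            have : |i - i| = (0 : Int) := by simp
            omega
        · refine Or.inr ⟨p, q, ?_, ?_, hr⟩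
          · rcases hp with ⟨-, hpi⟩ | hp
            · rw [hpi]; exact Or.inr (List.mem_cons_self ..)
            · exact Or.inr (List.mem_cons_of_mem _ hp)
          · rcases hq with ⟨-, hqi⟩ | hq
            · rw [hqi]; exact Or.inr (List.mem_cons_self ..)
            · exact Or.inr (List.mem_cons_of_mem _ hq)
    -- CASE 2 : x = mx, x ≠ mn
    · subst hx
      simp only [stepA, beq_self_eq_true, if_true, beq_iff_eq, hn, if_false]
      set a2 := (if 0 ≤ m ∧ i - m + 1 < ans then i - m + 1 else ans) with ha2
      have hA : a2 ≤ ans ∧ (0 ≤ m → a2 ≤ i - m + 1) ∧ (a2 = ans ∨ (0 ≤ m ∧ a2 = i - m + 1)) := by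
        rw [ha2]; split_ifs <;> omega
      obtain ⟨ih1, ih2, ih3⟩ := ih i m a2
        (fun ix hix => by have h := htl ix hix; have := hlt ix hix; exact ⟨by omega, h.2.1, h.2.2⟩)
        hpw'
        (fun hm0 _ => by have := abs_sub_of_lt hmi; have := hA.2.1 hm0; omega)
      refine ⟨by omega, ?_, ?_⟩
      · intro p q hp hq
        rcases hp with ⟨hm0, hpm⟩ | hp
        · rcases hq with ⟨hM0, hqM⟩ | hq
          · rw [hpm, hqM]; have := hpre hm0 hM0; omega
          · rcases List.mem_cons.mp hq with heq | hq
            · have hqi : q = i := congrArg Prod.fst heq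
              have e := abs_sub_of_lt (show p < q by omega)
              have := hA.2.1 hm0; omega
            · have h2 := ih2 p q (Or.inl ⟨hm0, hpm⟩) (Or.inr hq)
              exact h2
        · rcases List.mem_cons.mp hp with heq | hp
          · exact absurd (congrArg Prod.snd heq).symm hn
          · have hip := hlt (p, mn) hp
            rcases hq with ⟨hM0, hqM⟩ | hq
            · have h2 := ih2 p i (Or.inr hp) (Or.inl ⟨hi0, rfl⟩)
              have e1 := abs_sub_of_ge (show i ≤ p by omega)
              have e2 := abs_sub_of_ge (show q ≤ p by omega)
              omega
            · rcases List.mem_cons.mp hq with heq2 | hq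
              · have hqi : q = i := congrArg Prod.fst heq2
                have h2 := ih2 p i (Or.inr hp) (Or.inl ⟨hi0, rfl⟩)
                have e1 := abs_sub_of_ge (show i ≤ p by omega)
                have e2 := abs_sub_of_ge (show q ≤ p by omega)
                omega
              · exact ih2 p q (Or.inr hp) (Or.inr hq)
      · rcases ih3 with hr | ⟨p, q, hp, hq, hr⟩
        · rcases hA.2.2 with he | ⟨hm0, he⟩
          · exact Or.inl (hr.trans he)
          · refine Or.inr ⟨m, i, Or.inl ⟨hm0, rfl⟩, Or.inr (List.mem_cons_self ..), ?_⟩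
            have := abs_sub_of_lt hmi; omega
        · refine Or.inr ⟨p, q, ?_, ?_, hr⟩
          · rcases hp with hp | hp
            · exact Or.inl hp
            · exact Or.inr (List.mem_cons_of_mem _ hp)
          · rcases hq with ⟨-, hqi⟩ | hq
            · rw [hqi]; exact Or.inr (List.mem_cons_self ..)
            · exact Or.inr (List.mem_cons_of_mem _ hq)
    -- CASE 3 : x ≠ mx, x = mn
    · subst hn
      simp only [stepA, beq_self_eq_true, if_true, beq_iff_eq, hx, if_false]
      set a2 := (if 0 ≤ M ∧ i - M + 1 < ans then i - M + 1 else ans) with ha2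
      have hA : a2 ≤ ans ∧ (0 ≤ M → a2 ≤ i - M + 1) ∧ (a2 = ans ∨ (0 ≤ M ∧ a2 = i - M + 1)) := by
        rw [ha2]; split_ifs <;> omega
      obtain ⟨ih1, ih2, ih3⟩ := ih M i a2
        (fun ix hix => by have h := htl ix hix; have := hlt ix hix; exact ⟨h.1, by omega, h.2.2⟩)
        hpw'
        (fun _ hM0 => by have := abs_sub_of_ge (show M ≤ i by omega); have := hA.2.1 hM0; omega)
      refine ⟨by omega, ?_, ?_⟩
      · intro p q hp hq
        rcases hp with ⟨hm0, hpm⟩ | hp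
        · rcases hq with ⟨hM0, hqM⟩ | hq
          · rw [hpm, hqM]; have := hpre hm0 hM0; omega
          · rcases List.mem_cons.mp hq with heq | hq
            · exact absurd (congrArg Prod.snd heq).symm hx
            · have hiq := hlt (q, mx) hq
              have h2 := ih2 i q (Or.inl ⟨hi0, rfl⟩) (Or.inr hq)
              have e1 := abs_sub_of_lt (show i < q from hiq)
              have e2 := abs_sub_of_lt (show p < q by omega)
              omega
        · rcases List.mem_cons.mp hp with heq | hp
          · have hpi : p = i := congrArg Prod.fst heq
            rcases hq with ⟨hM0, hqM⟩ | hq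
            · have e := abs_sub_of_ge (show q ≤ p by omega)
              have := hA.2.1 hM0; omega
            · rcases List.mem_cons.mp hq with heq2 | hq
              · exact absurd (congrArg Prod.snd heq2).symm hx
              · have h2 := ih2 i q (Or.inl ⟨hi0, rfl⟩) (Or.inr hq)
                rw [hpi]; exact h2
          · rcases hq with ⟨hM0, hqM⟩ | hq
            · exact ih2 p q (Or.inr hp) (Or.inl ⟨hM0, hqM⟩)
            · rcases List.mem_cons.mp hq with heq2 | hq
              · exact absurd (congrArg Prod.snd heq2).symm hx
              · exact ih2 p q (Or.inr hp) (Or.inr hq)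
      · rcases ih3 with hr | ⟨p, q, hp, hq, hr⟩
        · rcases hA.2.2 with he | ⟨hM0, he⟩
          · exact Or.inl (hr.trans he)
          · refine Or.inr ⟨i, M, Or.inr (List.mem_cons_self ..), Or.inl ⟨hM0, rfl⟩, ?_⟩
            have := abs_sub_of_ge (show M ≤ i by omega); omega
        · refine Or.inr ⟨p, q, ?_, ?_, hr⟩
          · rcases hp with ⟨-, hpi⟩ | hp
            · rw [hpi]; exact Or.inr (List.mem_cons_self ..)
            · exact Or.inr (List.mem_cons_of_mem _ hp)
          · rcases hq with hq | hq
            · exact Or.inl hq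
            · exact Or.inr (List.mem_cons_of_mem _ hq)
    -- CASE 4 : x ≠ mx, x ≠ mn
    · simp only [stepA, beq_iff_eq, hx, hn, if_false]
      obtain ⟨ih1, ih2, ih3⟩ := ih M m ans htl hpw' hpre
      refine ⟨ih1, ?_, ?_⟩
      · intro p q hp hq
        have hp' : (0 ≤ m ∧ p = m) ∨ (p, mn) ∈ L := by
          rcases hp with hp | hp
          · exact Or.inl hp
          · rcases List.mem_cons.mp hp with heq | hp
            · exact absurd (congrArg Prod.snd heq).symm hn
            · exact Or.inr hp
        have hq' : (0 ≤ M ∧ q = M) ∨ (q, mx) ∈ L := by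
          rcases hq with hq | hq
          · exact Or.inl hq
          · rcases List.mem_cons.mp hq with heq | hq
            · exact absurd (congrArg Prod.snd heq).symm hx
            · exact Or.inr hq
        exact ih2 p q hp' hq'
      · rcases ih3 with hr | ⟨p, q, hp, hq, hr⟩
        · exact Or.inl hr
        · refine Or.inr ⟨p, q, ?_, ?_, hr⟩
          · rcases hp with hp | hp
            · exact Or.inl hp
            · exact Or.inr (List.mem_cons_of_mem _ hp)
          · rcases hq with hq | hq
            · exact Or.inl hq
            · exact Or.inr (List.mem_cons_of_mem _ hq)

lemma loopB_le_best : ∀ (P Q : List Int) (best : Int), solveAltLoop P Q best ≤ best := by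
  intro P Q best
  fun_induction solveAltLoop P Q best with
  | case1 p ps q qs best d b' hc ih =>
    have hb : b' ≤ d ∧ b' ≤ best ∧ (b' = d ∨ b' = best) := by
      have h0 : b' = if d < best then d else best := rfl
      rw [h0]; split_ifs <;> omega
    omega
  | case2 p ps q qs best d b' hc ih =>
    have hb : b' ≤ d ∧ b' ≤ best ∧ (b' = d ∨ b' = best) := by
      have h0 : b' = if d < best then d else best := rfl
      rw [h0]; split_ifs <;> omega
    omega
  | case3 P Q best h => exact le_refl _

lemma loopB_pairs : ∀ (P Q : List Int) (best : Int),
    P.Pairwise (· ≤ ·) → Q.Pairwise (· ≤ ·) →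
    ∀ p ∈ P, ∀ q ∈ Q, solveAltLoop P Q best ≤ |p - q| := by
  intro P Q best
  fun_induction solveAltLoop P Q best with
  | case1 p ps q qs best d b' hc ih =>
    intro hP hQ p' hp' q' hq'
    have hb : b' ≤ d ∧ b' ≤ best ∧ (b' = d ∨ b' = best) := by
      have h0 : b' = if d < best then d else best := rfl
      rw [h0]; split_ifs <;> omega
    have hrle : solveAltLoop ps (q :: qs) b' ≤ b' := loopB_le_best _ _ _
    rcases List.mem_cons.mp hp' with rfl | hp'
    · have hqq' : q ≤ q' := by
        rcases List.mem_cons.mp hq' with rfl | hq'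
        · exact le_refl _
        · exact (List.pairwise_cons.mp hQ).1 q' hq'
      have habs : d = q - p' := by
        show |p' - q| = q - p'
        rw [abs_of_neg (show p' - q < 0 by omega)]; ring
      have habs2 : |p' - q'| = q' - p' := by
        rw [abs_of_neg (show p' - q' < 0 by omega)]; ring
      omega
    · exact ih hP.of_cons hQ p' hp' q' hq'
  | case2 p ps q qs best d b' hc ih =>
    intro hP hQ p' hp' q' hq'
    have hb : b' ≤ d ∧ b' ≤ best ∧ (b' = d ∨ b' = best) := by
      have h0 : b' = if d < best then d else best := rfl
      rw [h0]; split_ifs <;> omega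
    have hrle : solveAltLoop (p :: ps) qs b' ≤ b' := loopB_le_best _ _ _
    rcases List.mem_cons.mp hq' with rfl | hq'
    · have hpp' : p ≤ p' := by
        rcases List.mem_cons.mp hp' with rfl | hp'
        · exact le_refl _
        · exact (List.pairwise_cons.mp hP).1 p' hp'
      have habs : d = p - q' := by
        show |p - q'| = p - q'
        exact abs_of_nonneg (by omega)
      have habs2 : |p' - q'| = p' - q' := by
        exact abs_of_nonneg (by omega)
      omega
    · exact ih hP hQ.of_cons p' hp' q' hq'
  | case3 P Q best h =>
    intro hP hQ p' hp' q' hq'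
    exfalso
    rcases P with _ | ⟨p, ps⟩
    · simp at hp'
    rcases Q with _ | ⟨q, qs⟩
    · simp at hq'
    exact h p ps q qs rfl rfl

lemma loopB_reached : ∀ (P Q : List Int) (best : Int),
    solveAltLoop P Q best = best ∨ ∃ p ∈ P, ∃ q ∈ Q, solveAltLoop P Q best = |p - q| := by
  intro P Q best
  fun_induction solveAltLoop P Q best with
  | case1 p ps q qs best d b' hc ih =>
    have hd : d = |p - q| := rfl
    have hb : b' = d ∨ b' = best := by
      have h0 : b' = if d < best then d else best := rfl
      rw [h0]; split_ifs <;> simp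
    rcases ih with h | ⟨p', hp', q', hq', h⟩
    · rcases hb with hb | hb
      · exact Or.inr ⟨p, List.mem_cons_self .., q, List.mem_cons_self .., h.trans (hb.trans hd)⟩
      · exact Or.inl (h.trans hb)
    · exact Or.inr ⟨p', List.mem_cons_of_mem _ hp', q', hq', h⟩
  | case2 p ps q qs best d b' hc ih =>
    have hd : d = |p - q| := rfl
    have hb : b' = d ∨ b' = best := by
      have h0 : b' = if d < best then d else best := rfl
      rw [h0]; split_ifs <;> simp
    rcases ih with h | ⟨p', hp', q', hq', h⟩
    · rcases hb with hb | hb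
      · exact Or.inr ⟨p, List.mem_cons_self .., q, List.mem_cons_self .., h.trans (hb.trans hd)⟩
      · exact Or.inl (h.trans hb)
    · exact Or.inr ⟨p', hp', q', List.mem_cons_of_mem _ hq', h⟩
  | case3 P Q best h => exact Or.inl rfl

lemma foldl_pair_minmax (A : List Int) : ∀ (a b : Int),
    A.foldl (fun (m : Int × Int) x => (if x < m.1 then x else m.1, if x > m.2 then x else m.2)) (a, b)
    = (A.foldl (fun m x => if x < m then x else m) a, A.foldl (fun m x => if x > m then x else m) b) := by
  induction A with
  | nil => intro a b; rfl
  | cons y A ih => intro a b; simp only [List.foldl_cons, ih]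

-- ===== VERDICT (by name: the statement is the Claim_ definition above) =====
theorem solve_spec : Claim_equal_solve := by
  intro A hD hP
  obtain ⟨a, A', rfl⟩ := List.exists_cons_of_ne_nil hP
  show solve (a :: A') = solve_alt (a :: A')
  have hA : solve (a :: A') = ((PySem.List.enumerate (a :: A') 0).foldl
      (stepA ((a :: A').foldl (fun m x => if x > m then x else m) a)
             ((a :: A').foldl (fun m x => if x < m then x else m) a))
      (-1, -1, ((a :: A').length : Int))).2.2 := by
    unfold solve
    rw [PySem.List.pyGet?_zero_cons]
    dsimp only
    rw [show (List.foldl (fun m i => if PySem.List.pyGetD (a :: A') i 0 > m then PySem.List.pyGetD (a :: A') i 0 else m) a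
          (PySem.List.pyRange 0 ((a :: A').length : Int) 1))
        = (a :: A').foldl (fun m x => if x > m then x else m) a from
      (foldl_pyRange_enumerate0 (fun m _ x => if x > m then x else m) (a :: A') a).trans
        (foldl_enumerate_snd (fun m x => if x > m then x else m) (a :: A') 0 a)]
    rw [show (List.foldl (fun m i => if PySem.List.pyGetD (a :: A') i 0 < m then PySem.List.pyGetD (a :: A') i 0 else m) a
          (PySem.List.pyRange 0 ((a :: A').length : Int) 1))
        = (a :: A').foldl (fun m x => if x < m then x else m) a from
      (foldl_pyRange_enumerate0 (fun m _ x => if x < m then x else m) (a :: A') a).trans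
        (foldl_enumerate_snd (fun m x => if x < m then x else m) (a :: A') 0 a)]
    set mxv := (a :: A').foldl (fun m x => if x > m then x else m) a with hmx
    set mnv := (a :: A').foldl (fun m x => if x < m then x else m) a with hmn
    exact congrArg (fun t : Int × Int × Int => t.2.2)
      (foldl_pyRange_enumerate0 (fun st i x => stepA mxv mnv st (i, x)) (a :: A')
        (-1, -1, ((a :: A').length : Int)))
  set mxv := (a :: A').foldl (fun m x => if x > m then x else m) a with hmx
  set mnv := (a :: A').foldl (fun m x => if x < m then x else m) a with hmn
  set E := PySem.List.enumerate (a :: A') 0 with hE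
  set P := ((PySem.List.enumerate (a :: A') 0).filter (fun ix => ix.2 == mnv)).map (·.1) with hPdef
  set Q := ((PySem.List.enumerate (a :: A') 0).filter (fun ix => ix.2 == mxv)).map (·.1) with hQdef
  have hB : solve_alt (a :: A') = solveAltLoop P Q (((a :: A').length : Int) - 1) + 1 := by
    unfold solve_alt
    dsimp only
    rw [foldl_pair_minmax]
  set n := (((a :: A').length : Nat) : Int) with hn
  -- A-side invariant instantiated at the full enumerate list and initial state
  have hidx : ∀ ix ∈ E, (-1 : Int) < ix.1 ∧ (-1 : Int) < ix.1 ∧ 0 ≤ ix.1 := by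
    intro ix hix
    have := enumerate_fst_ge (a :: A') 0 ix hix
    exact ⟨by omega, by omega, by omega⟩
  obtain ⟨a1, a2, a3⟩ := loopA_inv mxv mnv E (-1) (-1) n hidx
    (enumerate_fst_pairwise (a :: A') 0) (fun h _ => absurd h (by norm_num))
  -- B-side loop bounds
  have hsortP : P.Pairwise (· ≤ ·) := posList_pairwise (a :: A') mnv
  have hsortQ : Q.Pairwise (· ≤ ·) := posList_pairwise (a :: A') mxv
  have b1 := loopB_le_best P Q (n - 1)
  have b2 := loopB_pairs P Q (n - 1) hsortP hsortQ
  have b3 := loopB_reached P Q (n - 1)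
  rw [hA, hB]
  set rA := (E.foldl (stepA mxv mnv) (-1, -1, n)).2.2 with hrA
  set rB := solveAltLoop P Q (n - 1) with hrB
  have le1 : rA ≤ rB + 1 := by
    rcases b3 with h | ⟨p, hp, q, hq, h⟩
    · omega
    · have h2 := a2 p q (Or.inr ((mem_posList (a :: A') mnv p).mp hp))
        (Or.inr ((mem_posList (a :: A') mxv q).mp hq))
      omega
  have le2 : rB + 1 ≤ rA := by
    rcases a3 with h | ⟨p, q, hp, hq, h⟩
    · omega
    · rcases hp with ⟨h0, -⟩ | hp
      · omega
      rcases hq with ⟨h0, -⟩ | hq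
      · omega
      have h2 := b2 p ((mem_posList (a :: A') mnv p).mpr hp)
        q ((mem_posList (a :: A') mxv q).mpr hq)
      omega
  omega
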